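-- pv_equiv track=rewrite | github.com/kanakohirata/spectral-network-visualizer | app/snv_pub/visualizer/processing/multilayer_3d_ms_network/multilayer_3d_mesh_functsions.py | make_dic_of_zflat_3d_mesh_coordinates
-- ===== SOURCE A (Python) =====
-- def make_dic_of_zflat_3d_mesh_coordinates(l_layer_id, l_ranges_x, l_ranges_y, l_z):
--     dic_layer_id_vs_zflat_3d_mesh_coordinates = {}
--     l_3d_coordinates = []
--     for zi in range(0, len(l_z)):
--         for yi in range(0, len(l_ranges_y)):
--             for xi in range(0, len(l_ranges_x)):
--
--                 mesh_coord_x = [l_ranges_x[xi][0], l_ranges_x[xi][1], l_ranges_x[xi][0], l_ranges_x[xi][1]]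
--                 mesh_coord_y = [l_ranges_y[yi][0], l_ranges_y[yi][0], l_ranges_y[yi][1], l_ranges_y[yi][1]]
--                 mesh_coord_z = [l_z[zi], l_z[zi], l_z[zi], l_z[zi]]
--
--                 # make coordiates for 3d (fub z-flat) mesh
--
--                 l_3d_coordinates.append([mesh_coord_x, mesh_coord_y, mesh_coord_z])
--
--     count = 0
--
--     for layer_id in l_layer_id:
--         dic_layer_id_vs_zflat_3d_mesh_coordinates[layer_id] = l_3d_coordinates[count]
--         count = count + 1
--
--     return dic_layer_id_vs_zflat_3d_mesh_coordinates
-- ===== SOURCE B (Python) =====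
-- def _zflat_coord(l_ranges_x, l_ranges_y, l_z, nx, ny, i):
--     zi, rem = divmod(i, ny * nx)
--     yi, xi = divmod(rem, nx)
--     rx = l_ranges_x[xi]
--     ry = l_ranges_y[yi]
--     z = l_z[zi]
--     return [[rx[0], rx[1], rx[0], rx[1]],
--             [ry[0], ry[0], ry[1], ry[1]],
--             [z, z, z, z]]
--
-- def make_dic_of_zflat_3d_mesh_coordinates(l_layer_id, l_ranges_x, l_ranges_y, l_z):
--     nx = len(l_ranges_x)
--     ny = len(l_ranges_y)
--     return {layer_id: _zflat_coord(l_ranges_x, l_ranges_y, l_z, nx, ny, i)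
--             for i, layer_id in enumerate(l_layer_id)}
-- ===== Notes on version B (the rewrite author's own statement) =====
-- stated objective: faster
-- what changed: Instead of materializing the full nz*ny*nx grid of mesh coordinates and then indexing it per layer id, B decodes each layer's position counter directly into (z,y,x) indices with divmod and builds only the needed coordinates in one dict comprehension.
import Mathlib
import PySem

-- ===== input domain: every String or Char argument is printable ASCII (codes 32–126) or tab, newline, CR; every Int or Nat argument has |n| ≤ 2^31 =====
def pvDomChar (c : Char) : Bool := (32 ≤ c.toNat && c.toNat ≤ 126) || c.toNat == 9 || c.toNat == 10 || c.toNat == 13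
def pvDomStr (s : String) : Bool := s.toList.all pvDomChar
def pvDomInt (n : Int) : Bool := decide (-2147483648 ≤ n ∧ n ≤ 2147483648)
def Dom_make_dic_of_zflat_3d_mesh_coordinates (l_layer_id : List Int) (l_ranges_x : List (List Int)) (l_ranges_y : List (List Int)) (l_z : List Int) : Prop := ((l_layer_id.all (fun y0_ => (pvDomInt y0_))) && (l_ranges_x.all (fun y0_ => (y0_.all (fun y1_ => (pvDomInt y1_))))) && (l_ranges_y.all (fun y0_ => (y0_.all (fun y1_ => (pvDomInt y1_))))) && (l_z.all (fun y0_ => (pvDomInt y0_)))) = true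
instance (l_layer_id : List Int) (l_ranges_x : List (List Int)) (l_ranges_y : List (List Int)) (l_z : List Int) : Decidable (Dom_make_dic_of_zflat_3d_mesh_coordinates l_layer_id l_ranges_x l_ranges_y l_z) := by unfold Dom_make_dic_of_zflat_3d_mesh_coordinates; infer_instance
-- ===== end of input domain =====

-- B replaces A's full nz*ny*nx grid materialization by direct divmod decoding of each
-- layer counter into (z,y,x) indices: asymptotically faster, O(len(l_layer_id)).


-- ===== PORT A =====
-- A-side helper: the triple nested loop building l_3d_coordinates (the pyGetD defaults
-- are unreachable under Pre_, where Python's indexing would raise IndexError).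
def pvA_l3d (l_ranges_x : List (List Int)) (l_ranges_y : List (List Int)) (l_z : List Int) : List (List (List Int)) :=
  (PySem.List.pyRange 0 (PySem.List.len l_z) 1).foldl (fun acc zi =>
    (PySem.List.pyRange 0 (PySem.List.len l_ranges_y) 1).foldl (fun acc yi =>
      (PySem.List.pyRange 0 (PySem.List.len l_ranges_x) 1).foldl (fun acc xi =>
        let rx := PySem.List.pyGetD l_ranges_x xi []
        let ry := PySem.List.pyGetD l_ranges_y yi []
        let mesh_coord_x := [PySem.List.pyGetD rx 0 0, PySem.List.pyGetD rx 1 0,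
                             PySem.List.pyGetD rx 0 0, PySem.List.pyGetD rx 1 0]
        let mesh_coord_y := [PySem.List.pyGetD ry 0 0, PySem.List.pyGetD ry 0 0,
                             PySem.List.pyGetD ry 1 0, PySem.List.pyGetD ry 1 0]
        let mesh_coord_z := [PySem.List.pyGetD l_z zi 0, PySem.List.pyGetD l_z zi 0,
                             PySem.List.pyGetD l_z zi 0, PySem.List.pyGetD l_z zi 0]
        acc ++ [[mesh_coord_x, mesh_coord_y, mesh_coord_z]]) acc) acc) []

def make_dic_of_zflat_3d_mesh_coordinates (l_layer_id : List Int) (l_ranges_x : List (List Int)) (l_ranges_y : List (List Int)) (l_z : List Int) : List (Int × List (List Int)) :=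
  let l3d := pvA_l3d l_ranges_x l_ranges_y l_z
  (l_layer_id.foldl
    (fun (p : PySem.Dict Int (List (List Int)) × Int) layer_id =>
      (p.1.insert layer_id (PySem.List.pyGetD l3d p.2 []), p.2 + 1))
    (PySem.Dict.empty, 0)).1.items

-- ===== PORT B =====
-- B-side helper = _zflat_coord of Source B (the getD defaults are unreachable under Pre_).
def pvB_zflatCoord (l_ranges_x : List (List Int)) (l_ranges_y : List (List Int)) (l_z : List Int) (nx ny : Int) (i : Int) : List (List Int) :=
  let zr := (PySem.Int.divmod? i (ny * nx)).getD (0, 0)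
  let yx := (PySem.Int.divmod? zr.2 nx).getD (0, 0)
  let rx := PySem.List.pyGetD l_ranges_x yx.2 []
  let ry := PySem.List.pyGetD l_ranges_y yx.1 []
  let z := PySem.List.pyGetD l_z zr.1 0
  [[PySem.List.pyGetD rx 0 0, PySem.List.pyGetD rx 1 0, PySem.List.pyGetD rx 0 0, PySem.List.pyGetD rx 1 0],
   [PySem.List.pyGetD ry 0 0, PySem.List.pyGetD ry 0 0, PySem.List.pyGetD ry 1 0, PySem.List.pyGetD ry 1 0],
   [z, z, z, z]]

def make_dic_of_zflat_3d_mesh_coordinates_alt (l_layer_id : List Int) (l_ranges_x : List (List Int)) (l_ranges_y : List (List Int)) (l_z : List Int) : List (Int × List (List Int)) :=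
  let nx := PySem.List.len l_ranges_x
  let ny := PySem.List.len l_ranges_y
  ((PySem.List.enumerate l_layer_id 0).foldl
    (fun (d : PySem.Dict Int (List (List Int))) p =>
      d.insert p.2 (pvB_zflatCoord l_ranges_x l_ranges_y l_z nx ny p.1))
    PySem.Dict.empty).items

-- ===== PRECONDITION & SPEC =====
-- Pre_ = exactly the inputs on which Python A returns: the layer count fits in the grid,
-- and whenever the grid loops run (non-empty grid) every x/y range list has ≥ 2 entries.
def Pre_make_dic_of_zflat_3d_mesh_coordinates (l_layer_id : List Int) (l_ranges_x : List (List Int)) (l_ranges_y : List (List Int)) (l_z : List Int) : Prop :=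
  l_layer_id.length ≤ l_z.length * l_ranges_y.length * l_ranges_x.length ∧
  (0 < l_z.length * l_ranges_y.length * l_ranges_x.length →
    (∀ r ∈ l_ranges_x, 2 ≤ r.length) ∧ (∀ r ∈ l_ranges_y, 2 ≤ r.length))
instance (l_layer_id : List Int) (l_ranges_x : List (List Int)) (l_ranges_y : List (List Int)) (l_z : List Int) : Decidable (Pre_make_dic_of_zflat_3d_mesh_coordinates l_layer_id l_ranges_x l_ranges_y l_z) := by unfold Pre_make_dic_of_zflat_3d_mesh_coordinates; infer_instance

def pvWitness_make_dic_of_zflat_3d_mesh_coordinates : List Int × List (List Int) × List (List Int) × List Int :=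
  ([7, 8], [[0, 1], [2, 3]], [[4, 5]], [9])

def Spec_make_dic_of_zflat_3d_mesh_coordinates (l_layer_id : List Int) (l_ranges_x : List (List Int)) (l_ranges_y : List (List Int)) (l_z : List Int) (out : List (Int × List (List Int))) : Prop := out = make_dic_of_zflat_3d_mesh_coordinates_alt l_layer_id l_ranges_x l_ranges_y l_z
instance (l_layer_id : List Int) (l_ranges_x : List (List Int)) (l_ranges_y : List (List Int)) (l_z : List Int) (out : List (Int × List (List Int))) : Decidable (Spec_make_dic_of_zflat_3d_mesh_coordinates l_layer_id l_ranges_x l_ranges_y l_z out) := by unfold Spec_make_dic_of_zflat_3d_mesh_coordinates; infer_instance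

-- ===== CLAIM (what is proved, stated in full; the proofs are below) =====
def Claim_equal_make_dic_of_zflat_3d_mesh_coordinates : Prop := ∀ (l_layer_id : List Int) (l_ranges_x : List (List Int)) (l_ranges_y : List (List Int)) (l_z : List Int), Dom_make_dic_of_zflat_3d_mesh_coordinates l_layer_id l_ranges_x l_ranges_y l_z → Pre_make_dic_of_zflat_3d_mesh_coordinates l_layer_id l_ranges_x l_ranges_y l_z → Spec_make_dic_of_zflat_3d_mesh_coordinates l_layer_id l_ranges_x l_ranges_y l_z (make_dic_of_zflat_3d_mesh_coordinates l_layer_id l_ranges_x l_ranges_y l_z)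

-- ===== LEMMAS AND PROOFS =====

-- the common per-cell value, over Nat indices
def pvCoord (l_ranges_x : List (List Int)) (l_ranges_y : List (List Int)) (l_z : List Int) (zi yi xi : Nat) : List (List Int) :=
  let rx := l_ranges_x.getD xi []
  let ry := l_ranges_y.getD yi []
  let z := l_z.getD zi 0
  [[rx.getD 0 0, rx.getD 1 0, rx.getD 0 0, rx.getD 1 0],
   [ry.getD 0 0, ry.getD 0 0, ry.getD 1 0, ry.getD 1 0],
   [z, z, z, z]]

lemma pvA_l3d_eq (l_ranges_x l_ranges_y : List (List Int)) (l_z : List Int) :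
    pvA_l3d l_ranges_x l_ranges_y l_z =
      (List.range l_z.length).flatMap (fun zi =>
        (List.range l_ranges_y.length).flatMap (fun yi =>
          (List.range l_ranges_x.length).map (fun xi =>
            pvCoord l_ranges_x l_ranges_y l_z zi yi xi))) := by
  unfold pvA_l3d pvCoord
  simp only [PySem.List.len_eq, PySem.List.pyRange_zero_nat, List.foldl_map,
    PySem.List.pyGetD_natCast, PySem.List.foldl_append_singleton_eq_map,
    PySem.List.foldl_append_eq_flatMap]
  simp [PySem.List.pyGetD_ofNat', List.getD_eq_getElem?_getD]

lemma flatMap_range_getElem? {α : Type} (f : Nat → List α) (m n k : Nat)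
    (hf : ∀ z, z < n → (f z).length = m) (hk : k < n * m) :
    ((List.range n).flatMap f)[k]? = (f (k / m))[k % m]? := by
  induction n generalizing k with
  | zero => omega
  | succ n ih =>
    have hlen : ((List.range n).flatMap f).length = n * m := by
      rw [List.length_flatMap]
      rw [List.map_congr_left (fun z hz => hf z (by simp at hz; omega))]
      simp [Nat.mul_comm]
    have hnm : (n + 1) * m = n * m + m := Nat.succ_mul n m
    rw [List.range_succ, List.flatMap_append, List.flatMap_singleton]
    by_cases hk' : k < n * m
    · rw [List.getElem?_append_left (by omega)]
      exact ih k (fun z hz => hf z (by omega)) hk'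
    · have hm : 0 < m := by by_contra h; omega
      have hdiv : k / m = n := by
        have h1 : n ≤ k / m := Nat.le_div_iff_mul_le hm |>.mpr (by omega)
        have h2 : k / m < n + 1 := Nat.div_lt_iff_lt_mul hm |>.mpr (by omega)
        omega
      have hdm := Nat.div_add_mod k m
      rw [hdiv] at hdm
      have hcomm : m * n = n * m := Nat.mul_comm m n
      have hmod : k % m = k - n * m := by omega
      rw [List.getElem?_append_right (by omega), hlen, hdiv, hmod]

lemma pv_l3d_get (l_ranges_x l_ranges_y : List (List Int)) (l_z : List Int) (k : Nat)
    (hk : k < l_z.length * l_ranges_y.length * l_ranges_x.length) :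
    (pvA_l3d l_ranges_x l_ranges_y l_z)[k]? =
      some (pvCoord l_ranges_x l_ranges_y l_z
        (k / (l_ranges_y.length * l_ranges_x.length))
        (k % (l_ranges_y.length * l_ranges_x.length) / l_ranges_x.length)
        (k % l_ranges_x.length)) := by
  have hprod : 0 < l_z.length * l_ranges_y.length * l_ranges_x.length :=
    lt_of_le_of_lt (Nat.zero_le k) hk
  have hx : 0 < l_ranges_x.length := by
    rcases Nat.eq_zero_or_pos l_ranges_x.length with h | h
    · simp [h] at hprod
    · exact h
  have hy : 0 < l_ranges_y.length := by
    rcases Nat.eq_zero_or_pos l_ranges_y.length with h | h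
    · simp [h] at hprod
    · exact h
  rw [pvA_l3d_eq]
  have hinlen : ∀ z : Nat,
      ((List.range l_ranges_y.length).flatMap (fun yi =>
        (List.range l_ranges_x.length).map (fun xi =>
          pvCoord l_ranges_x l_ranges_y l_z z yi xi))).length
        = l_ranges_y.length * l_ranges_x.length := by
    intro z
    rw [List.length_flatMap]
    have h1 : (List.range l_ranges_y.length).map (fun yi =>
        ((List.range l_ranges_x.length).map (fun xi =>
          pvCoord l_ranges_x l_ranges_y l_z z yi xi)).length)
        = List.replicate l_ranges_y.length l_ranges_x.length := by
      rw [show (fun yi => ((List.range l_ranges_x.length).map (fun xi =>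
            pvCoord l_ranges_x l_ranges_y l_z z yi xi)).length)
          = (fun _ : Nat => l_ranges_x.length) from funext (fun yi => by simp)]
      simp [List.map_const']
    rw [h1, List.sum_replicate, smul_eq_mul]
  rw [flatMap_range_getElem?
    (fun z => (List.range l_ranges_y.length).flatMap (fun yi =>
      (List.range l_ranges_x.length).map (fun xi =>
        pvCoord l_ranges_x l_ranges_y l_z z yi xi)))
    (l_ranges_y.length * l_ranges_x.length) l_z.length k
    (fun z _ => hinlen z)
    (by rw [← Nat.mul_assoc]; exact hk)]
  have hmap : ∀ y : Nat,
      ((List.range l_ranges_x.length).map (fun xi =>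
        pvCoord l_ranges_x l_ranges_y l_z (k / (l_ranges_y.length * l_ranges_x.length)) y xi)).length
        = l_ranges_x.length := fun y => by simp
  rw [flatMap_range_getElem?
    (fun yi => (List.range l_ranges_x.length).map (fun xi =>
      pvCoord l_ranges_x l_ranges_y l_z (k / (l_ranges_y.length * l_ranges_x.length)) yi xi))
    l_ranges_x.length l_ranges_y.length _
    (fun y _ => hmap y)
    (Nat.mod_lt _ (Nat.mul_pos hy hx))]
  have hxm : k % (l_ranges_y.length * l_ranges_x.length) % l_ranges_x.length = k % l_ranges_x.length :=
    Nat.mod_mod_of_dvd _ ⟨l_ranges_y.length, Nat.mul_comm _ _⟩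
  rw [hxm, List.getElem?_map, List.getElem?_range (Nat.mod_lt _ hx)]
  rfl

lemma pvB_zflatCoord_eq (l_ranges_x l_ranges_y : List (List Int)) (l_z : List Int) (k : Nat)
    (hk : k < l_z.length * l_ranges_y.length * l_ranges_x.length) :
    pvB_zflatCoord l_ranges_x l_ranges_y l_z (PySem.List.len l_ranges_x) (PySem.List.len l_ranges_y) (k : Int) =
      pvCoord l_ranges_x l_ranges_y l_z
        (k / (l_ranges_y.length * l_ranges_x.length))
        (k % (l_ranges_y.length * l_ranges_x.length) / l_ranges_x.length)
        (k % l_ranges_x.length) := by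
  have hprod : 0 < l_z.length * l_ranges_y.length * l_ranges_x.length :=
    lt_of_le_of_lt (Nat.zero_le k) hk
  have hx : 0 < l_ranges_x.length := by
    rcases Nat.eq_zero_or_pos l_ranges_x.length with h | h
    · simp [h] at hprod
    · exact h
  have hy : 0 < l_ranges_y.length := by
    rcases Nat.eq_zero_or_pos l_ranges_y.length with h | h
    · simp [h] at hprod
    · exact h
  have hxy : ((l_ranges_y.length : Int) * (l_ranges_x.length : Int)) = ((l_ranges_y.length * l_ranges_x.length : Nat) : Int) := by push_cast; ring
  have hne : ((l_ranges_y.length * l_ranges_x.length : Nat) : Int) ≠ 0 := by positivity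
  have hne' : ((l_ranges_x.length : Nat) : Int) ≠ 0 := by positivity
  unfold pvB_zflatCoord pvCoord
  have hfd : ∀ (m k : Nat), Int.fdiv (m : Int) (k : Int) = ((m / k : Nat) : Int) :=
    fun m k => PySem.Int.floordiv_natCast m k
  have hfm : ∀ (m k : Nat), Int.fmod (m : Int) (k : Int) = ((m % k : Nat) : Int) :=
    fun m k => PySem.Int.mod_natCast m k
  simp only [PySem.List.len_eq, hxy, PySem.Int.divmod?, hne, hne', if_false,
    hfd, hfm, Option.getD_some, PySem.List.pyGetD_natCast]
  rw [Nat.mod_mod_of_dvd _ ⟨l_ranges_y.length, Nat.mul_comm _ _⟩]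
  simp [PySem.List.pyGetD_ofNat', List.getD_eq_getElem?_getD]

lemma pv_fold_eq (v w : Int → List (List Int)) (l : List Int) :
    ∀ (c : Nat) (d : PySem.Dict Int (List (List Int))),
    (∀ k, k < l.length → v ((c + k : Nat) : Int) = w ((c + k : Nat) : Int)) →
    (l.foldl (fun (p : PySem.Dict Int (List (List Int)) × Int) layer_id =>
        (p.1.insert layer_id (v p.2), p.2 + 1)) (d, (c : Int))).1
      = (PySem.List.enumerate l (c : Int)).foldl (fun d p => d.insert p.2 (w p.1)) d := by
  induction l with
  | nil => intro c d h; simp [PySem.List.enumerate_nil]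
  | cons x xs ih =>
    intro c d h
    rw [PySem.List.enumerate_cons]
    simp only [List.foldl_cons]
    have h0 := h 0 (by simp)
    simp only [Nat.add_zero] at h0
    have hc1 : ((c : Int) + 1) = (((c + 1 : Nat)) : Int) := by push_cast; ring
    rw [h0, hc1]
    exact ih (c + 1) (d.insert x (w (c : Int)))
      (fun k hk => by
        have := h (k + 1) (by simpa using Nat.succ_lt_succ hk)
        simpa [Nat.add_comm, Nat.add_assoc, Nat.add_left_comm] using this)

-- ===== VERDICT (by name: the statement is the Claim_ definition above) =====
theorem make_dic_of_zflat_3d_mesh_coordinates_spec : Claim_equal_make_dic_of_zflat_3d_mesh_coordinates := by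
  intro l_layer_id l_ranges_x l_ranges_y l_z _ hpre
  unfold Spec_make_dic_of_zflat_3d_mesh_coordinates
  unfold make_dic_of_zflat_3d_mesh_coordinates make_dic_of_zflat_3d_mesh_coordinates_alt
  refine congrArg PySem.Dict.items ?_
  have h := pv_fold_eq
    (fun i => PySem.List.pyGetD (pvA_l3d l_ranges_x l_ranges_y l_z) i [])
    (fun i => pvB_zflatCoord l_ranges_x l_ranges_y l_z (PySem.List.len l_ranges_x) (PySem.List.len l_ranges_y) i)
    l_layer_id 0 PySem.Dict.empty
    (fun k hk => by
      have hkp : k < l_z.length * l_ranges_y.length * l_ranges_x.length :=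
        lt_of_lt_of_le hk hpre.1
      simp only [Nat.zero_add]
      show PySem.List.pyGetD (pvA_l3d l_ranges_x l_ranges_y l_z) (k : Int) [] = _
      rw [PySem.List.pyGetD_natCast, List.getD_eq_getElem?_getD,
        pv_l3d_get l_ranges_x l_ranges_y l_z k hkp, Option.getD_some,
        pvB_zflatCoord_eq l_ranges_x l_ranges_y l_z k hkp])
  simpa using h
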